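-- pv_equiv track=rewrite | github.com/linhdvu14/cp-sols | sols/CodeChef/COOK143A/SEGFAULT.py | solve
-- ===== SOURCE A (Python) =====
-- def solve(N, segs):
--     endpoints = [s for l, r in segs for s in [(l-1, 1), (r, -1)]]
--     endpoints.sort(reverse=True)
--
--     res = []
--     bal = 0
--     for i in range(N):
--         while endpoints and endpoints[-1][0] <= i: bal += endpoints.pop()[1]
--         if bal == N-1 and not (segs[i][0] <= i+1 <= segs[i][1]): res.append(i+1)
--
--     return res
-- ===== SOURCE B (Python) =====
-- def solve(N, segs):
--     # Direct per-point counting instead of the sorted event sweep: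
--     # a point x is covered by segment (l, r) iff it has started (l <= x)
--     # and not ended (r < x); active = started - ended.
--     res = []
--     for i in range(N):
--         x = i + 1
--         started = sum(1 for l, r in segs if l <= x)
--         ended = sum(1 for l, r in segs if r < x)
--         if started - ended == N - 1 and not (segs[i][0] <= x <= segs[i][1]):
--             res.append(x)
--     return res
-- ===== Notes on version B (the rewrite author's own statement) =====
-- stated objective: simpler
-- what changed: Replaced the sorted event list and mutable sweep (balance counter, pop-while loop) by a direct per-point count: for each point x=i+1 count the segments that have started (l<=x) minus those that have ended (r<x), a plain double loop with no sorting and no mutable event state.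
-- outside the precondition, e.g. on solve(2, [(1, 1)]): A returns [], B returns []; on solve(2, [(1, 2)]): A raises IndexError, B raises IndexError
import Mathlib
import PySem

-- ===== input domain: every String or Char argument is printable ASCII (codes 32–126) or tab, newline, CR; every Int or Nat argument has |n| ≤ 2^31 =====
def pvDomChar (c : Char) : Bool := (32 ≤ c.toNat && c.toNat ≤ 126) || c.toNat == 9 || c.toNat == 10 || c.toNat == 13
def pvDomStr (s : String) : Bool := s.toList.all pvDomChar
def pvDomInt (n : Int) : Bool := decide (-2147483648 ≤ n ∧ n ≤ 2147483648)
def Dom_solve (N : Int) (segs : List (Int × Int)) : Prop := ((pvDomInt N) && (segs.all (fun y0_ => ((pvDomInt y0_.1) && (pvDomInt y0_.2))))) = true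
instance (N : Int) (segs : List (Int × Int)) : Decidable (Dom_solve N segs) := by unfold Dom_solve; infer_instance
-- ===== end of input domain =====

-- B replaces A's sorted event-list sweep by a direct per-point started-minus-ended count (simpler; not faster).


-- ===== PORT A =====
-- [s for l, r in segs for s in [(l-1, 1), (r, -1)]]
def pvEvents (segs : List (Int × Int)) : List (Int × Int) :=
  segs.flatMap (fun s => [(s.1 - 1, (1 : Int)), (s.2, (-1 : Int))])

-- 'while endpoints and endpoints[-1][0] <= i: bal += endpoints.pop()[1]'
def sweepPop (i : Int) (eps : List (Int × Int)) (bal : Int) : List (Int × Int) × Int :=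
  match h : eps.getLast? with
  | some e => if e.1 ≤ i then sweepPop i eps.dropLast (bal + e.2) else (eps, bal)
  | none => (eps, bal)
termination_by eps.length
decreasing_by
  have hne : eps ≠ [] := by intro hn; subst hn; simp at h
  have := List.length_pos_iff.mpr hne
  simp [List.length_dropLast]; omega

-- one iteration of A's 'for i in range(N)' loop; state = (endpoints, bal, res)
def stepA (N : Int) (segs : List (Int × Int)) (st : List (Int × Int) × Int × List Int)
    (i : Int) : List (Int × Int) × Int × List Int :=
  let p := sweepPop i st.1 st.2.1
  (p.1, p.2,
    if p.2 = N - 1 then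
      match PySem.List.pyGet? segs i with
      | some s => if ¬ (s.1 ≤ i + 1 ∧ i + 1 ≤ s.2) then st.2.2 ++ [i + 1] else st.2.2
      | none => st.2.2  -- segs[i] raises IndexError in Python; Pre_solve excludes reaching this
    else st.2.2)

def solve (N : Int) (segs : List (Int × Int)) : List Int :=
  ((PySem.List.pyRange 0 N 1).foldl (stepA N segs)
      (PySem.List.sorted (pvEvents segs) (fun e => toLex e) true, 0, [])).2.2

-- ===== PORT B =====
-- one iteration of B's loop: count started/ended segments at x = i+1
def stepB (N : Int) (segs : List (Int × Int)) (res : List Int) (i : Int) : List Int :=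
  let x := i + 1
  let started : Int := segs.countP (fun s => decide (s.1 ≤ x))
  let ended : Int := segs.countP (fun s => decide (s.2 < x))
  if started - ended = N - 1 then
    match PySem.List.pyGet? segs i with
    | some s => if ¬ (s.1 ≤ x ∧ x ≤ s.2) then res ++ [x] else res
    | none => res  -- segs[i] raises IndexError in Python; Pre_solve excludes reaching this
  else res

def solve_alt (N : Int) (segs : List (Int × Int)) : List Int :=
  (PySem.List.pyRange 0 N 1).foldl (stepB N segs) []

-- ===== PRECONDITION & SPEC =====
-- Pre_ excludes exactly the shape N = len(segs)+1, the only one on which the self-exclusion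
-- lookup segs[i] can raise IndexError (both programs raise identically there; A still returns []
-- on some such inputs when the balance never reaches N-1 — see the cited examples).
def Pre_solve (N : Int) (segs : List (Int × Int)) : Prop :=
  N ≤ (segs.length : Int) ∨ (segs.length : Int) + 2 ≤ N
instance (N : Int) (segs : List (Int × Int)) : Decidable (Pre_solve N segs) := by
  unfold Pre_solve; infer_instance

def pvWitness_solve : Int × (List (Int × Int)) := (2, [(1, 2), (2, 3)])

def Spec_solve (N : Int) (segs : List (Int × Int)) (out : List Int) : Prop := out = solve_alt N segs
instance (N : Int) (segs : List (Int × Int)) (out : List Int) : Decidable (Spec_solve N segs out) := by unfold Spec_solve; infer_instance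

-- ===== CLAIM (what is proved, stated in full; the proofs are below) =====
def Claim_equal_solve : Prop := ∀ (N : Int) (segs : List (Int × Int)), Dom_solve N segs → Pre_solve N segs → Spec_solve N segs (solve N segs)

-- ===== LEMMAS AND PROOFS =====

-- weighted sum of the deltas of all events with coordinate ≤ c
def wsum (c : Int) (l : List (Int × Int)) : Int :=
  (l.map (fun e => if e.1 ≤ c then e.2 else 0)).sum

theorem wsum_perm {xs ys : List (Int × Int)} (h : xs.Perm ys) (c : Int) :
    wsum c xs = wsum c ys :=
  List.Perm.sum_eq (h.map _)

theorem wsum_events (c : Int) (segs : List (Int × Int)) :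
    wsum c (pvEvents segs)
      = (segs.countP (fun s => decide (s.1 ≤ c + 1)) : Int)
        - (segs.countP (fun s => decide (s.2 ≤ c)) : Int) := by
  induction segs with
  | nil => simp [wsum, pvEvents]
  | cons s t ih =>
      simp only [wsum, pvEvents, List.flatMap_cons, List.map_append, List.sum_append,
        List.countP_cons] at ih ⊢
      split_ifs with h1 h2 h2 <;> simp_all <;> omega

theorem wsum_split {c a : Int} (h : c ≤ a) (S : List (Int × Int)) :
    wsum c S + wsum a (S.filter (fun e => decide (c < e.1))) = wsum a S := by
  induction S with
  | nil => simp [wsum]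
  | cons e t ih =>
      simp only [wsum, List.map_cons, List.sum_cons, List.filter_cons] at ih ⊢
      split_ifs <;> simp_all <;> omega

theorem sweepPop_eq (i : Int) (eps : List (Int × Int))
    (hp : eps.Pairwise (fun a b => b.1 ≤ a.1)) :
    ∀ bal, sweepPop i eps bal = (eps.filter (fun e => decide (i < e.1)), bal + wsum i eps) := by
  induction eps using List.reverseRecOn with
  | nil => intro bal; rw [sweepPop]; simp [wsum]
  | append_singleton ys e ih =>
      intro bal
      have hpy : ys.Pairwise (fun a b => b.1 ≤ a.1) := (List.pairwise_append.mp hp).1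
      have hall : ∀ y ∈ ys, e.1 ≤ y.1 := by
        intro y hy
        exact (List.pairwise_append.mp hp).2.2 y hy e (by simp)
      rw [sweepPop]
      simp only [List.dropLast_concat]
      split
      next e' h' =>
       have he' : e' = e := by
         rw [List.getLast?_concat] at h'; exact (Option.some.inj h').symm
       rw [he']
       by_cases he : e.1 ≤ i
       · rw [if_pos he, ih hpy]
         have hf : (ys ++ [e]).filter (fun e => decide (i < e.1))
             = ys.filter (fun e => decide (i < e.1)) := by
           simp [List.filter_append]; omega
         rw [hf]
         simp [wsum, he]
         omega
       · rw [if_neg he]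
         have hf : (ys ++ [e]).filter (fun e => decide (i < e.1)) = ys ++ [e] := by
           rw [List.filter_eq_self]
           intro x hx
           simp only [List.mem_append, List.mem_singleton] at hx
           rcases hx with hx | rfl
           · have := hall x hx; simp; omega
           · simp; omega
         have hw : wsum i (ys ++ [e]) = 0 := by
           apply List.sum_eq_zero
           intro x hx
           simp only [List.mem_map] at hx
           obtain ⟨y, hy, rfl⟩ := hx
           simp only [List.mem_append, List.mem_singleton] at hy
           rcases hy with hy | rfl
           · have := hall y hy; rw [if_neg]; omega
           · rw [if_neg]; omega
         rw [hf, hw, add_zero]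
      next h' =>
       rw [List.getLast?_concat] at h'
       simp at h'

theorem loop_eq (N : Int) (segs : List (Int × Int)) (S : List (Int × Int))
    (hS : S = PySem.List.sorted (pvEvents segs) (fun e => toLex e) true) :
    ∀ (k : Nat) (a c : Int) (res : List Int), N - a ≤ k → 0 ≤ a → c < a →
      ((PySem.List.pyRange a N 1).foldl (stepA N segs)
          (S.filter (fun e => decide (c < e.1)), wsum c S, res)).2.2
        = (PySem.List.pyRange a N 1).foldl (stepB N segs) res := by
  have hperm : S.Perm (pvEvents segs) := hS ▸ PySem.List.sorted_perm _ _ _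
  have hP : S.Pairwise (fun a b => b.1 ≤ a.1) := by
    have := hS ▸ PySem.List.sorted_pairwise_rev (pvEvents segs) (fun e => toLex e)
    exact this.imp (fun h => by
      rcases (Prod.Lex.toLex_le_toLex).mp h with h | ⟨h, _⟩
      · exact le_of_lt h
      · exact le_of_eq h)
  intro k
  induction k with
  | zero =>
      intro a c res hk h0 hc
      rw [PySem.List.pyRange_one_eq_nil (by omega)]
      simp
  | succ k ih =>
      intro a c res hk h0 hc
      by_cases hab : a < N
      · rw [PySem.List.pyRange_one_cons hab]
        simp only [List.foldl_cons]
        have hpair : (S.filter (fun e => decide (c < e.1))).Pairwise (fun a b => b.1 ≤ a.1) :=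
          hP.filter _
        have hA : stepA N segs (S.filter (fun e => decide (c < e.1)), wsum c S, res) a
            = (S.filter (fun e => decide (a < e.1)), wsum a S, stepB N segs res a) := by
          simp only [stepA]
          rw [sweepPop_eq a _ hpair]
          have hff : (S.filter (fun e => decide (c < e.1))).filter (fun e => decide (a < e.1))
              = S.filter (fun e => decide (a < e.1)) := by
            rw [List.filter_filter]
            apply List.filter_congr
            intro x _
            simp; omega
          have hws : wsum c S + wsum a (S.filter (fun e => decide (c < e.1))) = wsum a S :=
            wsum_split (by omega) S
          simp only [hff, hws]
          -- the balance equals B's started-minus-ended count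
          have hbal : wsum a S = (segs.countP (fun s => decide (s.1 ≤ a + 1)) : Int)
              - (segs.countP (fun s => decide (s.2 ≤ a)) : Int) := by
            rw [wsum_perm hperm, wsum_events]
          have hcnt : segs.countP (fun s => decide (s.2 < a + 1))
              = segs.countP (fun s => decide (s.2 ≤ a)) := by
            apply List.countP_congr
            intro s _
            simp
          simp only [stepB]
          simp only [hcnt, ← hbal]
        rw [hA]
        exact ih (a + 1) a (stepB N segs res a) (by omega) (by omega) (by omega)
      · rw [PySem.List.pyRange_one_eq_nil (by omega)]
        simp

-- ===== VERDICT (by name: the statement is the Claim_ definition above) =====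
theorem solve_spec : Claim_equal_solve := by
  intro N segs hdom hpre
  unfold Spec_solve solve solve_alt
  simp only [Dom_solve, Bool.and_eq_true, List.all_eq_true] at hdom
  set S := PySem.List.sorted (pvEvents segs) (fun e => toLex e) true with hS
  have hmem : ∀ e ∈ S, (-2147483650 : Int) < e.1 := by
    intro e he
    have : e ∈ pvEvents segs := (PySem.List.mem_sorted _ _ _ _).mp he
    simp only [pvEvents, List.mem_flatMap] at this
    obtain ⟨s, hs, hin⟩ := this
    have hb := hdom.2 s hs
    simp only [pvDomInt, decide_eq_true_eq] at hb
    simp only [List.mem_cons] at hin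
    rcases hin with rfl | hin
    · simp; omega
    · rcases hin with rfl | h
      · simp; omega
      · exact absurd h (List.not_mem_nil)
  have hfe : S.filter (fun e => decide ((-2147483650 : Int) < e.1)) = S := by
    rw [List.filter_eq_self]
    intro e he; simpa using hmem e he
  have hw0 : wsum (-2147483650) S = 0 := by
    apply List.sum_eq_zero
    intro x hx
    simp only [List.mem_map] at hx
    obtain ⟨e, he, rfl⟩ := hx
    rw [if_neg]
    have := hmem e he; omega
  have := loop_eq N segs S hS N.toNat 0 (-2147483650) []
    (by omega) le_rfl (by omega)
  rw [hfe, hw0] at this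
  exact this
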